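-- pv_equiv track=rewrite | github.com/rahulsamant37/Daily-Task | Python/python_question_1014.py | solution
-- ===== SOURCE A (Python) =====
-- def solution(nums):
--     """
--     Finds the length of the longest increasing subsequence with prime differences.
--
--     Args:
--         nums: A list of integers.
--
--     Returns:
--         The length of the longest increasing subsequence with prime differences.
--     """
--
--     def is_prime(n):
--         """
--         Checks if a number is prime.
--         """
--         if n <= 1:
--             return False
--         for i in range(2, int(n**0.5) + 1):
--             if n % i == 0:
--                 return False
--         return True
--
--     n = len(nums)
--     if n == 0:
--         return 0
--
--     # dp[i] stores the length of the longest increasing subsequence ending at nums[i]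
--     dp = [1] * n
--
--     for i in range(1, n):
--         for j in range(i):
--             if nums[i] > nums[j] and is_prime(nums[i] - nums[j]):
--                 dp[i] = max(dp[i], dp[j] + 1)
--
--     return max(dp)
-- ===== SOURCE B (Python) =====
-- def solution(nums):
--     def is_prime(n):
--         if n <= 1:
--             return False
--         for i in range(2, int(n**0.5) + 1):
--             if n % i == 0:
--                 return False
--         return True
--
--     if not nums:
--         return 0
--
--     memo = {}
--
--     def best(i):
--         """Length of the longest valid increasing subsequence ending at index i."""
--         if i in memo:
--             return memo[i]
--         res = 1
--         for j in range(i):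
--             if nums[i] > nums[j] and is_prime(nums[i] - nums[j]):
--                 res = max(res, best(j) + 1)
--         memo[i] = res
--         return res
--
--     return max(best(i) for i in range(len(nums)))
-- ===== Notes on version B (the rewrite author's own statement) =====
-- stated objective: alternative
-- what changed: Replaced the bottom-up dp table filled by nested index loops with a top-down memoized recursion best(i) (length of the longest valid subsequence ending at i), taking the max of best(i) over all indices.
import Mathlib
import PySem

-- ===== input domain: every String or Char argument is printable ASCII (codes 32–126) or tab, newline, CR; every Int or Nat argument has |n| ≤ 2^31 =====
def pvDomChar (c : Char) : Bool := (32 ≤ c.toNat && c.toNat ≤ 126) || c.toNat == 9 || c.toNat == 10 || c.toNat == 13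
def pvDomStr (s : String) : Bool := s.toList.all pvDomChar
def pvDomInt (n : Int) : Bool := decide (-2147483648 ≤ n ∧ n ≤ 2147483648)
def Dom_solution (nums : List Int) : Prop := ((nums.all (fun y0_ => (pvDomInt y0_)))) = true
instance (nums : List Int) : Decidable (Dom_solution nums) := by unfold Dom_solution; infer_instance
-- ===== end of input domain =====

-- B replaces A's bottom-up dp table with a top-down memoized recursion best(i); alternative decomposition, same cost.

-- ===== PORT A =====
-- is_prime, identical in both Python sources (shared helper).
-- int(n**0.5) equals Nat.sqrt here: float sqrt is exact enough for n ≤ 2^32 (|nums| ≤ 2^31 on Dom).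
def pvIsPrime (n : Int) : Bool :=
  if n ≤ 1 then false
  else (PySem.List.pyRange 2 ((Nat.sqrt n.toNat : Int) + 1) 1).all (fun i => PySem.Int.mod n i != 0)

-- the shared test 'nums[i] > nums[j] and is_prime(nums[i] - nums[j])' (indices in range in both programs)
def pvCond (nums : List Int) (i j : Nat) : Bool :=
  decide (nums.getD j 0 < nums.getD i 0) && pvIsPrime (nums.getD i 0 - nums.getD j 0)

def solution (nums : List Int) : Int :=
  let n := nums.length
  if n = 0 then 0
  else
    let dp : List Int := List.replicate n 1
    let dp := (List.range' 1 (n - 1)).foldl (fun dp i =>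
      (List.range i).foldl (fun dp j =>
        if pvCond nums i j then
          dp.set i (max (dp.getD i 0) (dp.getD j 0 + 1))
        else dp) dp) dp
    -- dp is nonempty here, so max(dp) returns (getD defaults are never read)
    (PySem.List.max? dp (fun y => y)).getD 0

-- ===== PORT B =====
-- top-down memoized recursion: pvBest i = best(i), pvLoop = its 'for j in range(i)' loop, memo threaded through
mutual
def pvBest (nums : List Int) (i : Nat) (memo : PySem.Dict Nat Int) : Int × PySem.Dict Nat Int :=
  match memo.get? i with
  | some v => (v, memo)
  | none =>
    let p := pvLoop nums i 0 1 memo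
    (p.1, p.2.insert i p.1)
termination_by (i + 1, 0)
decreasing_by all_goals (simp only [Prod.lex_iff]; omega)

def pvLoop (nums : List Int) (i j : Nat) (res : Int) (memo : PySem.Dict Nat Int) : Int × PySem.Dict Nat Int :=
  if _h : j < i then
    if pvCond nums i j then
      let p := pvBest nums j memo
      pvLoop nums i (j + 1) (max res (p.1 + 1)) p.2
    else pvLoop nums i (j + 1) res memo
  else (res, memo)
termination_by (i, i - j + 1)
decreasing_by all_goals (simp only [Prod.lex_iff, true_and]; omega)
end

def solution_alt (nums : List Int) : Int :=
  if nums.isEmpty then 0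
  else
    -- max(best(i) for i in range(len(nums))): evaluate left to right threading the memo
    let p := (List.range nums.length).foldl
      (fun (p : List Int × PySem.Dict Nat Int) i =>
        let q := pvBest nums i p.2
        (p.1 ++ [q.1], q.2)) ([], PySem.Dict.empty)
    (PySem.List.max? p.1 (fun y => y)).getD 0

-- ===== PRECONDITION & SPEC =====
def Spec_solution (nums : List Int) (out : Int) : Prop := out = solution_alt nums
instance (nums : List Int) (out : Int) : Decidable (Spec_solution nums out) := by unfold Spec_solution; infer_instance

-- ===== CLAIM (what is proved, stated in full; the proofs are below) =====
def Claim_equal_solution : Prop := ∀ (nums : List Int), Dom_solution nums → Spec_solution nums (solution nums)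

-- ===== LEMMAS AND PROOFS =====

-- the common recurrence value: length of the longest valid increasing subsequence ending at index i
def pvL (nums : List Int) : Nat → Int
  | i => (List.range i).attach.foldl
      (fun acc j => if pvCond nums i j.1 then max acc (pvL nums j.1 + 1) else acc) 1
termination_by i => i
decreasing_by exact List.mem_range.mp j.2

def pvF (nums : List Int) (i : Nat) : Int → Nat → Int :=
  fun acc j => if pvCond nums i j then max acc (pvL nums j + 1) else acc

lemma pvL_eq (nums : List Int) (i : Nat) :
    pvL nums i = (List.range i).foldl (pvF nums i) 1 := by
  rw [pvL]
  exact List.foldl_attach (f := pvF nums i) (b := 1) (l := List.range i)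

def pvInv (nums : List Int) (m : PySem.Dict Nat Int) : Prop :=
  ∀ k v, m.get? k = some v → v = pvL nums k

lemma pvLoop_correct (nums : List Int) (i : Nat)
    (IH : ∀ j, j < i → ∀ m, pvInv nums m →
      (pvBest nums j m).1 = pvL nums j ∧ pvInv nums (pvBest nums j m).2) :
    ∀ d j res m, i - j ≤ d → pvInv nums m →
      (pvLoop nums i j res m).1 = (List.range' j (i - j)).foldl (pvF nums i) res ∧
      pvInv nums (pvLoop nums i j res m).2 := by
  intro d
  induction d with
  | zero =>
    intro j res m hd hm
    rw [pvLoop.eq_def]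
    have : ¬ j < i := by omega
    simp [this, Nat.sub_eq_zero_of_le (by omega : i ≤ j), hm]
  | succ d ih =>
    intro j res m hd hm
    rw [pvLoop.eq_def]
    by_cases hji : j < i
    · have hrange : i - j = (i - (j + 1)) + 1 := by omega
      by_cases hc : pvCond nums i j = true
      · simp only [hji, hc, dif_pos, if_pos]
        obtain ⟨hv, hm'⟩ := IH j hji m hm
        have := ih (j + 1) (max res ((pvBest nums j m).1 + 1)) (pvBest nums j m).2 (by omega) hm'
        rw [hrange, List.range'_succ, List.foldl_cons]
        simpa [pvF, hc, hv] using this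
      · simp only [hji, hc, dif_pos, if_neg, Bool.not_eq_true]
        have := ih (j + 1) res m (by omega) hm
        rw [hrange, List.range'_succ, List.foldl_cons]
        simpa [pvF, hc] using this
    · have : i - j = 0 := by omega
      simp [hji, this, hm]

lemma pvBest_correct (nums : List Int) :
    ∀ i m, pvInv nums m →
      (pvBest nums i m).1 = pvL nums i ∧ pvInv nums (pvBest nums i m).2 := by
  intro i
  induction i using Nat.strong_induction_on with
  | _ i IH =>
    intro m hm
    cases hg : m.get? i with
    | some v =>
      have heq : pvBest nums i m = (v, m) := by rw [pvBest.eq_def, hg]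
      rw [heq]
      exact ⟨hm i v hg, hm⟩
    | none =>
      have heq : pvBest nums i m
          = ((pvLoop nums i 0 1 m).1, (pvLoop nums i 0 1 m).2.insert i (pvLoop nums i 0 1 m).1) := by
        rw [pvBest.eq_def, hg]
      have hloop := pvLoop_correct nums i (fun j hj => IH j hj) i 0 1 m (by omega) hm
      have hval : (pvLoop nums i 0 1 m).1 = pvL nums i := by
        rw [hloop.1, Nat.sub_zero, pvL_eq, List.range_eq_range']
      rw [heq]
      refine ⟨hval, ?_⟩
      intro k v hk
      by_cases hki : i = k
      · subst hki
        rw [PySem.Dict.get?_insert_self] at hk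
        rw [← Option.some.inj hk, hval]
      · rw [PySem.Dict.get?_insert_of_ne _ _ (fun h => hki h.symm)] at hk
        exact hloop.2 k v hk

-- B's outer loop: collects pvL over the visited indices
lemma pvOuterB (nums : List Int) :
    ∀ (l : List Nat) (acc : List Int) (m : PySem.Dict Nat Int), pvInv nums m →
      (l.foldl (fun (p : List Int × PySem.Dict Nat Int) i =>
        let q := pvBest nums i p.2
        (p.1 ++ [q.1], q.2)) (acc, m)).1 = acc ++ l.map (pvL nums) := by
  intro l
  induction l with
  | nil => intro acc m _; simp
  | cons i t ih =>
    intro acc m hm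
    obtain ⟨hv, hm'⟩ := pvBest_correct nums i m hm
    simp only [List.foldl_cons, List.map_cons]
    rw [hv] at *
    have := ih (acc ++ [pvL nums i]) (pvBest nums i m).2 hm'
    simpa [hv] using this

-- A's inner loop: a run over js (all < i) sets index i to the folded value
lemma pvInnerA (nums : List Int) (i : Nat) :
    ∀ (js : List Nat) (dp : List Int), i < dp.length →
      (∀ j ∈ js, j < i ∧ dp.getD j 0 = pvL nums j) →
      js.foldl (fun dp j =>
        if pvCond nums i j then dp.set i (max (dp.getD i 0) (dp.getD j 0 + 1)) else dp) dp
      = dp.set i (js.foldl (pvF nums i) (dp.getD i 0)) := by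
  intro js
  induction js with
  | nil =>
    intro dp hlen _
    simp only [List.foldl_nil]
    apply List.ext_getElem (by simp)
    intro k hk1 hk2
    rw [List.getElem_set]
    split
    · next h => subst h; simp [List.getD_eq_getElem?_getD, List.getElem?_eq_getElem hk1]
    · rfl
  | cons j t ih =>
    intro dp hlen hjs
    obtain ⟨hji, hdj⟩ := hjs j (by simp)
    simp only [List.foldl_cons]
    by_cases hc : pvCond nums i j = true
    · rw [if_pos hc]
      set dp' := dp.set i (max (dp.getD i 0) (dp.getD j 0 + 1)) with hdp'
      have h1 : i < dp'.length := by simp [hdp', hlen]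
      have h2 : ∀ j' ∈ t, j' < i ∧ dp'.getD j' 0 = pvL nums j' := by
        intro j' hj'
        obtain ⟨h3, h4⟩ := hjs j' (by simp [hj'])
        refine ⟨h3, ?_⟩
        rw [hdp', List.getD_eq_getElem?_getD, List.getElem?_set_ne (by omega)]
        rw [List.getD_eq_getElem?_getD] at h4
        exact h4
      rw [ih dp' h1 h2]
      have h5 : dp'.getD i 0 = max (dp.getD i 0) (dp.getD j 0 + 1) := by
        rw [hdp', List.getD_eq_getElem?_getD, List.getElem?_set_self hlen]
        rfl
      rw [hdp', List.set_set, h5, hdj]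
      simp [pvF, hc]
    · rw [if_neg hc, ih dp hlen (fun j' hj' => hjs j' (by simp [hj']))]
      simp [pvF, hc]

-- A's outer loop: after processing i = 1 .. m, dp holds pvL below m+1 and 1 above
lemma pvOuterA (nums : List Int) (n : Nat) (hn : n = nums.length) :
    ∀ (m : Nat), m ≤ n - 1 →
      (List.range' 1 m).foldl (fun dp i =>
        (List.range i).foldl (fun dp j =>
          if pvCond nums i j then dp.set i (max (dp.getD i 0) (dp.getD j 0 + 1)) else dp) dp)
        (List.replicate n 1)
      = (List.range n).map (fun t => if t ≤ m then pvL nums t else 1) := by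
  intro m
  induction m with
  | zero =>
    intro _
    simp only [List.range'_zero, List.foldl_nil]
    apply List.ext_getElem (by simp)
    intro k hk1 hk2
    simp only [List.getElem_replicate, List.getElem_map, List.getElem_range]
    split
    · next h =>
      have : k = 0 := by omega
      subst this
      rw [pvL]; simp
    · rfl
  | succ m ih =>
    intro hm
    rw [List.range'_concat, List.foldl_append, ih (by omega), List.foldl_cons, List.foldl_nil]
    have h1m : 1 + 1 * m = m + 1 := by omega
    rw [h1m]
    set dpm := (List.range n).map (fun t => if t ≤ m then pvL nums t else 1) with hdpm
    have hlen : m + 1 < dpm.length := by simp [hdpm]; omega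
    have hjs : ∀ j ∈ List.range (m + 1), j < m + 1 ∧ dpm.getD j 0 = pvL nums j := by
      intro j hj
      have hj' := List.mem_range.mp hj
      refine ⟨hj', ?_⟩
      rw [hdpm, List.getD_eq_getElem?_getD, List.getElem?_map, List.getElem?_range (by omega)]
      simp only [Option.map_some, Option.getD_some]
      rw [if_pos (by omega)]
    rw [pvInnerA nums (m + 1) (List.range (m + 1)) dpm hlen hjs]
    have hd1 : dpm.getD (m + 1) 0 = 1 := by
      rw [hdpm, List.getD_eq_getElem?_getD, List.getElem?_map, List.getElem?_range (by omega)]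
      simp only [Option.map_some, Option.getD_some]
      rw [if_neg (by omega)]
    rw [hd1, ← pvL_eq]
    apply List.ext_getElem (by simp [hdpm])
    intro k hk1 hk2
    rw [List.getElem_set]
    simp only [hdpm, List.getElem_map, List.getElem_range]
    split
    · next h => subst h; rw [if_pos (by omega)]
    · next h =>
      by_cases hk : k ≤ m
      · rw [if_pos hk, if_pos (by omega)]
      · rw [if_neg hk, if_neg (by omega)]

lemma pvA_eq (nums : List Int) (h : nums ≠ []) :
    solution nums = (PySem.List.max? ((List.range nums.length).map (pvL nums)) (fun y => y)).getD 0 := by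
  have hn : nums.length ≠ 0 := by simpa using h
  unfold solution
  simp only [if_neg hn]
  rw [pvOuterA nums nums.length rfl (nums.length - 1) le_rfl]
  congr 1
  congr 1
  apply List.map_congr_left
  intro t ht
  rw [if_pos (by have := List.mem_range.mp ht; omega)]

lemma pvB_eq (nums : List Int) (h : nums ≠ []) :
    solution_alt nums = (PySem.List.max? ((List.range nums.length).map (pvL nums)) (fun y => y)).getD 0 := by
  unfold solution_alt
  rw [if_neg (by simpa [List.isEmpty_iff] using h)]
  simp only
  rw [pvOuterB nums (List.range nums.length) [] PySem.Dict.empty (by intro k v hk; simp [PySem.Dict.empty, PySem.Dict.get?] at hk)]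
  simp

-- ===== VERDICT (by name: the statement is the Claim_ definition above) =====
theorem solution_spec : Claim_equal_solution := by
  intro nums _
  unfold Spec_solution
  by_cases h : nums = []
  · subst h; rfl
  · rw [pvA_eq nums h, pvB_eq nums h]
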